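-- pv_equiv track=rewrite | github.com/Momojie-S/OpenClaw-Alpha | src/openclaw_alpha/core/signal_utils.py | build_signal_id
-- ===== SOURCE A (Python) =====
-- def build_signal_id(signal_type: str, params: dict) -> str:
--     """构建信号 ID
--
--     Args:
--         signal_type: 信号类型（如 ma_cross, rsi, bollinger）
--         params: 参数字典
--
--     Returns:
--         信号 ID（如 ma_cross_5_20）
--     """
--     # 根据信号类型提取关键参数
--     if signal_type == "ma_cross":
--         return f"ma_cross_{params.get('fast', 5)}_{params.get('slow', 20)}"
--     elif signal_type == "rsi":
--         return f"rsi_{params.get('period', 14)}_{params.get('lower', 30)}_{params.get('upper', 70)}"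
--     elif signal_type == "bollinger":
--         return f"bollinger_{params.get('period', 20)}_{params.get('std', 2)}"
--     elif signal_type == "northbound_flow":
--         return f"northbound_{params.get('days', 5)}d"
--     elif signal_type == "rotation":
--         return f"rotation_{params.get('threshold', 20)}"
--     else:
--         # 通用方式：拼接参数值
--         param_str = "_".join(str(v) for v in params.values())
--         return f"{signal_type}_{param_str}" if param_str else signal_type
-- ===== SOURCE B (Python) =====
-- _TEMPLATES = {
--     "ma_cross": "ma_cross_{fast:5}_{slow:20}",
--     "rsi": "rsi_{period:14}_{lower:30}_{upper:70}",
--     "bollinger": "bollinger_{period:20}_{std:2}",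
--     "northbound_flow": "northbound_{days:5}d",
--     "rotation": "rotation_{threshold:20}",
-- }
--
--
-- def build_signal_id(signal_type: str, params: dict) -> str:
--     tpl = _TEMPLATES.get(signal_type)
--     if tpl is None:
--         param_str = "_".join(str(v) for v in params.values())
--         return f"{signal_type}_{param_str}" if param_str else signal_type
--     out = []
--     i = 0
--     while i < len(tpl):
--         if tpl[i] == "{":
--             j = tpl.index(":", i)
--             k = tpl.index("}", j)
--             out.append(str(params.get(tpl[i + 1:j], int(tpl[j + 1:k]))))
--             i = k + 1
--         else:
--             out.append(tpl[i])
--             i += 1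
--     return "".join(out)
-- ===== Notes on version B (the rewrite author's own statement) =====
-- stated objective: alternative
-- what changed: Replaces A's per-type if/elif cascade of format expressions with one template string per known type ('rsi_{period:14}_{lower:30}_{upper:70}') rendered by a character-scanning mini-interpreter that substitutes {key:default} placeholders with str(params.get(key, default)); unknown types use the same values-join fallback.
import Mathlib
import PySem

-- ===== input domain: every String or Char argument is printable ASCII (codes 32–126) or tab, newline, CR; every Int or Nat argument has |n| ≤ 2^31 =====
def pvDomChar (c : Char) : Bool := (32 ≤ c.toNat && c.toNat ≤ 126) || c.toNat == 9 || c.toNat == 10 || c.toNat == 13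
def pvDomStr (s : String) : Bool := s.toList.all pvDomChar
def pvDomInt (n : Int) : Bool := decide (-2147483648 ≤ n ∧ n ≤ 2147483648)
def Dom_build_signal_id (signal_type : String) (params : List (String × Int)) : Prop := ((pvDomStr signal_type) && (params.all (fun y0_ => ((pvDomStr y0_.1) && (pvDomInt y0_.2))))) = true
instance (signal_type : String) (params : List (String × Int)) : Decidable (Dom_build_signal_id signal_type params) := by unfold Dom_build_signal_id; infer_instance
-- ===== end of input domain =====

-- B replaces A's per-type format expressions with one template string per known type, rendered by a
-- character-scanning interpreter substituting {key:default} placeholders; objective: alternative.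
-- params is a Python dict, ported as an insertion-ordered association list (lookup = first match).

-- ===== PORT A =====
-- params.get(k, d): first match in the association list, else the default.
def pvParamGetD (params : List (String × Int)) (k : String) (d : Int) : Int :=
  match params.find? (fun p => p.1 == k) with
  | some p => p.2
  | none => d

def build_signal_id (signal_type : String) (params : List (String × Int)) : String :=
  if signal_type = "ma_cross" then
    "ma_cross_" ++ PySem.Int.toStr (pvParamGetD params "fast" 5) ++ "_" ++ PySem.Int.toStr (pvParamGetD params "slow" 20)
  else if signal_type = "rsi" then
    "rsi_" ++ PySem.Int.toStr (pvParamGetD params "period" 14) ++ "_" ++ PySem.Int.toStr (pvParamGetD params "lower" 30) ++ "_" ++ PySem.Int.toStr (pvParamGetD params "upper" 70)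
  else if signal_type = "bollinger" then
    "bollinger_" ++ PySem.Int.toStr (pvParamGetD params "period" 20) ++ "_" ++ PySem.Int.toStr (pvParamGetD params "std" 2)
  else if signal_type = "northbound_flow" then
    "northbound_" ++ PySem.Int.toStr (pvParamGetD params "days" 5) ++ "d"
  else if signal_type = "rotation" then
    "rotation_" ++ PySem.Int.toStr (pvParamGetD params "threshold" 20)
  else
    let param_str := PySem.Str.join "_" (params.map (fun p => PySem.Int.toStr p.2))
    if param_str ≠ "" then signal_type ++ "_" ++ param_str else signal_type

-- ===== PORT B =====
-- template table: signal_type ↦ template with {key:default} placeholders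
def pvTemplates : List (String × String) :=
  [("ma_cross", "ma_cross_{fast:5}_{slow:20}"),
   ("rsi", "rsi_{period:14}_{lower:30}_{upper:70}"),
   ("bollinger", "bollinger_{period:20}_{std:2}"),
   ("northbound_flow", "northbound_{days:5}d"),
   ("rotation", "rotation_{threshold:20}")]

-- the while loop of Source B as structural recursion over the template's characters;
-- int(tpl[j+1:k]) via PySem.Int.ofStr? (exact: template defaults are plain digit strings, so it is some)
def pvRender (params : List (String × Int)) : List Char → List Char
  | [] => []
  | c :: rest =>
    if c = '{' then
      let key := String.ofList (rest.takeWhile (fun c => c != ':'))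
      let ds := String.ofList (((rest.dropWhile (fun c => c != ':')).drop 1).takeWhile (fun c => c != '}'))
      let d : Int := (PySem.Int.ofStr? ds).getD 0
      (PySem.Int.toStr (pvParamGetD params key d)).toList ++
        pvRender params ((((rest.dropWhile (fun c => c != ':')).drop 1).dropWhile (fun c => c != '}')).drop 1)
    else
      c :: pvRender params rest
termination_by l => l.length
decreasing_by
  · have h1 := List.length_dropWhile_le (fun c => c != ':') rest
    have h2 := List.length_dropWhile_le (fun c => c != '}') ((rest.dropWhile (fun c => c != ':')).drop 1)
    simp only [List.length_drop, List.length_cons] at *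
    omega
  · simp

def build_signal_id_alt (signal_type : String) (params : List (String × Int)) : String :=
  match pvTemplates.find? (fun s => s.1 == signal_type) with
  | some (_, tpl) => String.ofList (pvRender params tpl.toList)
  | none =>
      let param_str := PySem.Str.join "_" (params.map (fun p => PySem.Int.toStr p.2))
      if param_str ≠ "" then signal_type ++ "_" ++ param_str else signal_type

-- ===== PRECONDITION & SPEC =====
def Spec_build_signal_id (signal_type : String) (params : List (String × Int)) (out : String) : Prop := out = build_signal_id_alt signal_type params
instance (signal_type : String) (params : List (String × Int)) (out : String) : Decidable (Spec_build_signal_id signal_type params out) := by unfold Spec_build_signal_id; infer_instance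

-- ===== CLAIM =====
def Claim_equal_build_signal_id : Prop := ∀ (signal_type : String) (params : List (String × Int)), Dom_build_signal_id signal_type params → Spec_build_signal_id signal_type params (build_signal_id signal_type params)

-- ===== LEMMAS AND PROOFS =====

-- ===== VERDICT =====
theorem build_signal_id_spec : Claim_equal_build_signal_id := by
  intro st params _
  unfold Spec_build_signal_id
  by_cases h1 : st = "ma_cross"
  · subst h1
    apply String.toList_injective
    simp [build_signal_id, build_signal_id_alt, pvTemplates, pvRender, pvParamGetD, String.toList_ofList,
          show String.ofList ['f','a','s','t'] = "fast" from rfl,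
          show String.ofList ['s','l','o','w'] = "slow" from rfl,
          show String.ofList ['p','e','r','i','o','d'] = "period" from rfl,
          show String.ofList ['l','o','w','e','r'] = "lower" from rfl,
          show String.ofList ['u','p','p','e','r'] = "upper" from rfl,
          show String.ofList ['d','a','y','s'] = "days" from rfl,
          show String.ofList ['s','t','d'] = "std" from rfl,
          show String.ofList ['t','h','r','e','s','h','o','l','d'] = "threshold" from rfl,
          show (PySem.Int.ofStr? (String.ofList ['5'])).getD 0 = 5 by decide,
          show (PySem.Int.ofStr? (String.ofList ['2','0'])).getD 0 = 20 by decide,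
          show (PySem.Int.ofStr? (String.ofList ['1','4'])).getD 0 = 14 by decide,
          show (PySem.Int.ofStr? (String.ofList ['3','0'])).getD 0 = 30 by decide,
          show (PySem.Int.ofStr? (String.ofList ['7','0'])).getD 0 = 70 by decide,
          show (PySem.Int.ofStr? (String.ofList ['2'])).getD 0 = 2 by decide]
  by_cases h2 : st = "rsi"
  · subst h2
    apply String.toList_injective
    simp [build_signal_id, build_signal_id_alt, pvTemplates, pvRender, pvParamGetD, String.toList_ofList,
          show String.ofList ['f','a','s','t'] = "fast" from rfl,
          show String.ofList ['s','l','o','w'] = "slow" from rfl,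
          show String.ofList ['p','e','r','i','o','d'] = "period" from rfl,
          show String.ofList ['l','o','w','e','r'] = "lower" from rfl,
          show String.ofList ['u','p','p','e','r'] = "upper" from rfl,
          show String.ofList ['d','a','y','s'] = "days" from rfl,
          show String.ofList ['s','t','d'] = "std" from rfl,
          show String.ofList ['t','h','r','e','s','h','o','l','d'] = "threshold" from rfl,
          show (PySem.Int.ofStr? (String.ofList ['5'])).getD 0 = 5 by decide,
          show (PySem.Int.ofStr? (String.ofList ['2','0'])).getD 0 = 20 by decide,
          show (PySem.Int.ofStr? (String.ofList ['1','4'])).getD 0 = 14 by decide,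
          show (PySem.Int.ofStr? (String.ofList ['3','0'])).getD 0 = 30 by decide,
          show (PySem.Int.ofStr? (String.ofList ['7','0'])).getD 0 = 70 by decide,
          show (PySem.Int.ofStr? (String.ofList ['2'])).getD 0 = 2 by decide]
  by_cases h3 : st = "bollinger"
  · subst h3
    apply String.toList_injective
    simp [build_signal_id, build_signal_id_alt, pvTemplates, pvRender, pvParamGetD, String.toList_ofList,
          show String.ofList ['f','a','s','t'] = "fast" from rfl,
          show String.ofList ['s','l','o','w'] = "slow" from rfl,
          show String.ofList ['p','e','r','i','o','d'] = "period" from rfl,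
          show String.ofList ['l','o','w','e','r'] = "lower" from rfl,
          show String.ofList ['u','p','p','e','r'] = "upper" from rfl,
          show String.ofList ['d','a','y','s'] = "days" from rfl,
          show String.ofList ['s','t','d'] = "std" from rfl,
          show String.ofList ['t','h','r','e','s','h','o','l','d'] = "threshold" from rfl,
          show (PySem.Int.ofStr? (String.ofList ['5'])).getD 0 = 5 by decide,
          show (PySem.Int.ofStr? (String.ofList ['2','0'])).getD 0 = 20 by decide,
          show (PySem.Int.ofStr? (String.ofList ['1','4'])).getD 0 = 14 by decide,
          show (PySem.Int.ofStr? (String.ofList ['3','0'])).getD 0 = 30 by decide,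
          show (PySem.Int.ofStr? (String.ofList ['7','0'])).getD 0 = 70 by decide,
          show (PySem.Int.ofStr? (String.ofList ['2'])).getD 0 = 2 by decide]
  by_cases h4 : st = "northbound_flow"
  · subst h4
    apply String.toList_injective
    simp [build_signal_id, build_signal_id_alt, pvTemplates, pvRender, pvParamGetD, String.toList_ofList,
          show String.ofList ['f','a','s','t'] = "fast" from rfl,
          show String.ofList ['s','l','o','w'] = "slow" from rfl,
          show String.ofList ['p','e','r','i','o','d'] = "period" from rfl,
          show String.ofList ['l','o','w','e','r'] = "lower" from rfl,
          show String.ofList ['u','p','p','e','r'] = "upper" from rfl,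
          show String.ofList ['d','a','y','s'] = "days" from rfl,
          show String.ofList ['s','t','d'] = "std" from rfl,
          show String.ofList ['t','h','r','e','s','h','o','l','d'] = "threshold" from rfl,
          show (PySem.Int.ofStr? (String.ofList ['5'])).getD 0 = 5 by decide,
          show (PySem.Int.ofStr? (String.ofList ['2','0'])).getD 0 = 20 by decide,
          show (PySem.Int.ofStr? (String.ofList ['1','4'])).getD 0 = 14 by decide,
          show (PySem.Int.ofStr? (String.ofList ['3','0'])).getD 0 = 30 by decide,
          show (PySem.Int.ofStr? (String.ofList ['7','0'])).getD 0 = 70 by decide,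
          show (PySem.Int.ofStr? (String.ofList ['2'])).getD 0 = 2 by decide]
  by_cases h5 : st = "rotation"
  · subst h5
    apply String.toList_injective
    simp [build_signal_id, build_signal_id_alt, pvTemplates, pvRender, pvParamGetD, String.toList_ofList,
          show String.ofList ['f','a','s','t'] = "fast" from rfl,
          show String.ofList ['s','l','o','w'] = "slow" from rfl,
          show String.ofList ['p','e','r','i','o','d'] = "period" from rfl,
          show String.ofList ['l','o','w','e','r'] = "lower" from rfl,
          show String.ofList ['u','p','p','e','r'] = "upper" from rfl,
          show String.ofList ['d','a','y','s'] = "days" from rfl,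
          show String.ofList ['s','t','d'] = "std" from rfl,
          show String.ofList ['t','h','r','e','s','h','o','l','d'] = "threshold" from rfl,
          show (PySem.Int.ofStr? (String.ofList ['5'])).getD 0 = 5 by decide,
          show (PySem.Int.ofStr? (String.ofList ['2','0'])).getD 0 = 20 by decide,
          show (PySem.Int.ofStr? (String.ofList ['1','4'])).getD 0 = 14 by decide,
          show (PySem.Int.ofStr? (String.ofList ['3','0'])).getD 0 = 30 by decide,
          show (PySem.Int.ofStr? (String.ofList ['7','0'])).getD 0 = 70 by decide,
          show (PySem.Int.ofStr? (String.ofList ['2'])).getD 0 = 2 by decide]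
  · simp [build_signal_id, build_signal_id_alt, pvTemplates, h1, h2, h3, h4, h5,
          beq_eq_false_iff_ne.mpr (Ne.symm h1), beq_eq_false_iff_ne.mpr (Ne.symm h2),
          beq_eq_false_iff_ne.mpr (Ne.symm h3), beq_eq_false_iff_ne.mpr (Ne.symm h4),
          beq_eq_false_iff_ne.mpr (Ne.symm h5)]
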